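-- pv_equiv track=rewrite | github.com/samuelmf1/1-v-proteome | bin/filter_interactions.py | find_motifs
-- ===== SOURCE A (Python) =====
-- def find_motifs(residues, gap, min_res):
--     """
--     Cluster sorted residues. Returns True if any cluster has >= min_res.
--     residues: sorted list of integers (residue numbers)
--     gap: max distance to link residues
--     min_res: minimum size of a valid cluster
--     """
--     if not residues:
--         return False, []
--
--     clusters = []
--     current_cluster = [residues[0]]
--
--     for r in residues[1:]:
--         if r - current_cluster[-1] <= gap:
--             current_cluster.append(r)
--         else:
--             clusters.append(current_cluster)
--             current_cluster = [r]
--     clusters.append(current_cluster)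
--
--     valid_clusters = [c for c in clusters if len(c) >= min_res]
--     return len(valid_clusters) > 0, valid_clusters
-- ===== SOURCE B (Python) =====
-- def find_motifs(residues, gap, min_res):
--     # Two phases: first derive the cluster size profile from adjacent pairs,
--     # then cut the list into clusters by slicing at those sizes.
--     if not residues:
--         return False, []
--     sizes = []
--     k = 1
--     for p, r in zip(residues, residues[1:]):
--         if r - p <= gap:
--             k += 1
--         else:
--             sizes.append(k)
--             k = 1
--     sizes.append(k)
--     clusters = []
--     pos = 0
--     for s in sizes:
--         clusters.append(residues[pos:pos + s])
--         pos += s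
--     valid = [c for c in clusters if len(c) >= min_res]
--     return len(valid) > 0, valid
-- ===== Notes on version B (the rewrite author's own statement) =====
-- stated objective: alternative
-- what changed: B splits the work into two phases: a pass over adjacent pairs that only records the cluster size profile, then a slicing pass that cuts the list at those sizes, instead of A's single loop that copies elements into a current-cluster buffer and flushes it into clusters.
import Mathlib
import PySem

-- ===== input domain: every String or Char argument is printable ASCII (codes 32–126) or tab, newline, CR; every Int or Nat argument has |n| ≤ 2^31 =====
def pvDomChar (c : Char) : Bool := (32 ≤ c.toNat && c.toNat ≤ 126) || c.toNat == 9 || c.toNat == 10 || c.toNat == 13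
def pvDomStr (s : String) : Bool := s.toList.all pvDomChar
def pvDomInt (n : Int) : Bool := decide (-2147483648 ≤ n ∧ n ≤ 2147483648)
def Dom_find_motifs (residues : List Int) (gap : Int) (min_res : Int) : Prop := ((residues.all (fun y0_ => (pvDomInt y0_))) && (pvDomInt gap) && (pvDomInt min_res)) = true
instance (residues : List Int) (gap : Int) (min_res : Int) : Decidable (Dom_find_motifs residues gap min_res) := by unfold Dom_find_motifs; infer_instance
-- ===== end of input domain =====

-- B replaces A's forward loop with a buffered current cluster by two phases: a pass
-- over adjacent pairs computing the cluster size profile, then slicing the list at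
-- those sizes (alternative decomposition, same linear cost).


-- ===== PORT A =====
-- one step of A's loop body; state = (clusters, current_cluster).
-- current_cluster is always nonempty, so `getLastD 0` is exactly Python's
-- current_cluster[-1] on every reachable state.
def aStep (gap : Int) (st : List (List Int) × List Int) (r : Int) : List (List Int) × List Int :=
  if r - st.2.getLastD 0 ≤ gap then (st.1, st.2 ++ [r])
  else (st.1 ++ [st.2], [r])

def find_motifs (residues : List Int) (gap : Int) (min_res : Int) : Bool × List (List Int) :=
  match residues with
  | [] => (false, [])
  | r0 :: rest =>
    let st := rest.foldl (aStep gap) ([], [r0])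
    let clusters := st.1 ++ [st.2]
    let valid := clusters.filter (fun c => min_res ≤ (c.length : Int))
    (decide (0 < valid.length), valid)

-- ===== PORT B =====
-- phase 1 step: state = (sizes, k), input = one adjacent pair (p, r)
def b1Step (gap : Int) (st : List Int × Int) (pr : Int × Int) : List Int × Int :=
  if pr.2 - pr.1 ≤ gap then (st.1, st.2 + 1) else (st.1 ++ [st.2], 1)

-- phase 2 step: state = (clusters, pos); residues[pos:pos+s] is PySem.List.slice
def b2Step (residues : List Int) (st : List (List Int) × Int) (s : Int) : List (List Int) × Int :=
  (st.1 ++ [PySem.List.slice residues (some st.2) (some (st.2 + s))], st.2 + s)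

def find_motifs_alt (residues : List Int) (gap : Int) (min_res : Int) : Bool × List (List Int) :=
  match residues with
  | [] => (false, [])
  | _ :: _ =>
    let p1 := (residues.zip (residues.drop 1)).foldl (b1Step gap) ([], 1)
    let sizes := p1.1 ++ [p1.2]
    let clusters := (sizes.foldl (b2Step residues) ([], 0)).1
    let valid := clusters.filter (fun c => min_res ≤ (c.length : Int))
    (decide (0 < valid.length), valid)

-- ===== PRECONDITION & SPEC =====
def Spec_find_motifs (residues : List Int) (gap : Int) (min_res : Int) (out : Bool × List (List Int)) : Prop := out = find_motifs_alt residues gap min_res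
instance (residues : List Int) (gap : Int) (min_res : Int) (out : Bool × List (List Int)) : Decidable (Spec_find_motifs residues gap min_res out) := by unfold Spec_find_motifs; infer_instance

-- ===== CLAIM (what is proved, stated in full; the proofs are below) =====
def Claim_equal_find_motifs : Prop := ∀ (residues : List Int) (gap : Int) (min_res : Int), Dom_find_motifs residues gap min_res → Spec_find_motifs residues gap min_res (find_motifs residues gap min_res)

-- ===== LEMMAS AND PROOFS =====

-- reference clustering: clAux gap xs cur = the clusters produced when cur is the
-- open cluster and xs the remaining residues.
def clAux (gap : Int) : List Int → List Int → List (List Int)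
  | [], cur => [cur]
  | r :: rs, cur =>
    if r - cur.getLastD 0 ≤ gap then clAux gap rs (cur ++ [r])
    else cur :: clAux gap rs [r]

-- A's foldl computes clAux
theorem aFold_clAux (gap : Int) (xs : List Int) : ∀ (cs : List (List Int)) (cur : List Int),
    (xs.foldl (aStep gap) (cs, cur)).1 ++ [(xs.foldl (aStep gap) (cs, cur)).2] = cs ++ clAux gap xs cur := by
  induction xs with
  | nil => intro cs cur; simp [clAux]
  | cons r rs ih =>
    intro cs cur
    simp only [List.foldl_cons, aStep, clAux]
    split
    · exact ih cs (cur ++ [r])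
    · rw [ih (cs ++ [cur]) [r]]; simp

-- the clusters concatenate back to the input
theorem clAux_flatten (gap : Int) (xs : List Int) : ∀ (cur : List Int),
    (clAux gap xs cur).flatten = cur ++ xs := by
  induction xs with
  | nil => intro cur; simp [clAux]
  | cons r rs ih =>
    intro cur
    simp only [clAux]
    split
    · rw [ih (cur ++ [r])]; simp
    · simp [ih [r]]

-- B's phase-1 fold computes the length profile of clAux
theorem b1_sizes (gap : Int) (xs : List Int) : ∀ (cur : List Int) (prev : Int),
    cur.getLastD 0 = prev → ∀ (acc : List Int),
    (((prev :: xs).zip xs).foldl (b1Step gap) (acc, (cur.length : Int))).1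
      ++ [(((prev :: xs).zip xs).foldl (b1Step gap) (acc, (cur.length : Int))).2]
    = acc ++ (clAux gap xs cur).map (fun c => (c.length : Int)) := by
  induction xs with
  | nil => intro cur prev _ acc; simp [clAux]
  | cons x rs ih =>
    intro cur prev hprev acc
    simp only [List.zip_cons_cons, List.foldl_cons, b1Step, clAux, hprev]
    split
    · have h1 : ((cur ++ [x]).getLastD 0) = x := by simp
      have h2 : (((cur ++ [x]).length : Int)) = (cur.length : Int) + 1 := by
        simp
      have := ih (cur ++ [x]) x h1 acc
      rw [h2] at this
      simpa using this
    · have := ih [x] x (by simp) (acc ++ [(cur.length : Int)])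
      simp only [List.length_singleton, Nat.cast_one] at this
      rw [this]; simp

-- B's phase-2 fold cuts the list back into exactly the clusters whose lengths it is fed
theorem b2_slices (residues : List Int) (css : List (List Int)) :
    ∀ (pre acc : List (List Int)), residues = pre.flatten ++ css.flatten →
    ((css.map (fun c => (c.length : Int))).foldl (b2Step residues) (acc, (pre.flatten.length : Int))).1
      = acc ++ css := by
  induction css with
  | nil => intro pre acc _; simp
  | cons c cs ih =>
    intro pre acc hres
    simp only [List.map_cons, List.foldl_cons, b2Step]
    have hslice : PySem.List.slice residues (some (pre.flatten.length : Int))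
        (some ((pre.flatten.length : Int) + (c.length : Int))) = c := by
      rw [PySem.List.slice_natCast_add, hres]
      simp only [List.flatten_cons, ← List.append_assoc]
      rw [List.append_assoc, List.drop_left, List.take_left]
    have hpos : (pre.flatten.length : Int) + (c.length : Int) = (((pre ++ [c]).flatten).length : Int) := by
      simp
    rw [hslice, hpos]
    have := ih (pre ++ [c]) (acc ++ [c]) (by simpa using hres)
    rw [this]; simp

theorem find_motifs_eq (residues : List Int) (gap : Int) (min_res : Int) :
    find_motifs residues gap min_res = find_motifs_alt residues gap min_res := by
  cases residues with
  | nil => rfl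
  | cons r0 rest =>
    simp only [find_motifs, find_motifs_alt]
    have hA := aFold_clAux gap rest [] [r0]
    simp only [List.nil_append] at hA
    have hzip : ((r0 :: rest).zip ((r0 :: rest).drop 1)) = ((r0 :: rest).zip rest) := rfl
    have hsizes := b1_sizes gap rest [r0] r0 (by simp) []
    simp only [List.length_singleton, Nat.cast_one, List.nil_append] at hsizes
    have hflat := clAux_flatten gap rest [r0]
    have hslices := b2_slices (r0 :: rest) (clAux gap rest [r0]) [] []
      (by simpa using hflat.symm)
    simp only [List.flatten_nil, List.length_nil, Nat.cast_zero, List.nil_append] at hslices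
    rw [hzip, hsizes, hslices, hA]

-- ===== VERDICT (by name: the statement is the Claim_ definition above) =====
theorem find_motifs_spec : Claim_equal_find_motifs := by
  intro residues gap min_res _
  exact find_motifs_eq residues gap min_res
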